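-- pv_equiv track=rewrite | github.com/kennelm2025/Mikes-Capstone | bbo_dashboard/data.py | running_best
-- ===== SOURCE A (Python) =====
-- def running_best(scores, maximize):
--     result, rb = [], None
--     for s in scores:
--         if s is None:
--             result.append(None); continue
--         if rb is None: rb = s
--         rb = max(rb, s) if maximize else min(rb, s)
--         result.append(rb)
--     return result
-- ===== SOURCE B (Python) =====
-- def running_best(scores, maximize):
--     op = max if maximize else min
--     vals = [s for s in scores if s is not None]
--     bests = vals[:1]
--     for v in vals[1:]:
--         bests.append(op(bests[-1], v))
--     it = iter(bests)
--     return [None if s is None else next(it) for s in scores]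
-- ===== Notes on version B (the rewrite author's own statement) =====
-- stated objective: alternative
-- what changed: B filters out the Nones first, computes the running best of the remaining values as a prefix accumulation, and then reinterleaves those results back into the None positions, instead of A's single loop carrying a None/not-None state variable.
import Mathlib
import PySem

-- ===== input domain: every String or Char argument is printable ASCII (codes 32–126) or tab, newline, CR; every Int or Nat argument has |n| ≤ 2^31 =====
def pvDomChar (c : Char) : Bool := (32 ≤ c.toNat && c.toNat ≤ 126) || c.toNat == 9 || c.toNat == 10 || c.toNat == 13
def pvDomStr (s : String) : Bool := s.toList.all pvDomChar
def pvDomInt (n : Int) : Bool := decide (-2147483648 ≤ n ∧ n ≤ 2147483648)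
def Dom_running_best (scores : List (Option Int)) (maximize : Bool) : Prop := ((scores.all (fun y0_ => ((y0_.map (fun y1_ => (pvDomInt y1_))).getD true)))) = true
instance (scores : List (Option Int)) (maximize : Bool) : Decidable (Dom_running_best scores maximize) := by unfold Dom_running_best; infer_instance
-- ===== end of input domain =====

-- B recomposes the task as filter → prefix-accumulate → reinterleave instead of A's
-- single state-carrying loop (objective: alternative decomposition, same cost).

-- ===== PORT A =====
-- A's loop, state = rb (None until the first non-None score); result built in order.
def runningBestLoopA (scores : List (Option Int)) (maximize : Bool) (rb : Option Int) :
    List (Option Int) :=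
  match scores with
  | [] => []
  | none :: t => none :: runningBestLoopA t maximize rb
  | some s :: t =>
    let rb1 : Int := match rb with | none => s | some r => r
    let rb2 : Int := if maximize then max rb1 s else min rb1 s
    some rb2 :: runningBestLoopA t maximize (some rb2)

def running_best (scores : List (Option Int)) (maximize : Bool) : List (Option Int) :=
  runningBestLoopA scores maximize none

-- ===== PORT B =====
-- bests = vals[:1] then append op(bests[-1], v) for each later v (prefix accumulation),
-- carried here as the last element `a` while emitting front-to-back.
def accGo (op : Int → Int → Int) (a : Int) : List Int → List Int
  | [] => [a]
  | v :: t => a :: accGo op (op a v) t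

def running_best_alt (scores : List (Option Int)) (maximize : Bool) : List (Option Int) :=
  let op : Int → Int → Int := if maximize then max else min
  let vals : List Int := scores.filterMap id
  let bests : List Int :=
    match vals with
    | [] => []
    | v :: t => accGo op v t
  -- reinterleave: emit None at None positions, otherwise the next best
  weave scores bests
where
  weave : List (Option Int) → List Int → List (Option Int)
    | [], _ => []
    | none :: t, bs => none :: weave t bs
    | some _ :: t, [] => []
    | some _ :: t, b :: bs => some b :: weave t bs

-- ===== PRECONDITION & SPEC =====
def Spec_running_best (scores : List (Option Int)) (maximize : Bool) (out : List (Option Int)) : Prop := out = running_best_alt scores maximize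
instance (scores : List (Option Int)) (maximize : Bool) (out : List (Option Int)) : Decidable (Spec_running_best scores maximize out) := by unfold Spec_running_best; infer_instance

-- ===== CLAIM (what is proved, stated in full; the proofs are below) =====
def Claim_equal_running_best : Prop := ∀ (scores : List (Option Int)) (maximize : Bool), Dom_running_best scores maximize → Spec_running_best scores maximize (running_best scores maximize)

-- ===== LEMMAS AND PROOFS =====

-- proof-side accumulation: outputs op r v₁, op (op r v₁) v₂, …
def accStep (op : Int → Int → Int) (r : Int) : List Int → List Int
  | [] => []
  | v :: t => op r v :: accStep op (op r v) t

theorem accGo_eq_cons_accStep (op : Int → Int → Int) (a : Int) (t : List Int) :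
    accGo op a t = a :: accStep op a t := by
  induction t generalizing a with
  | nil => rfl
  | cons v t ih => simp [accGo, accStep, ih]

theorem loopA_some (scores : List (Option Int)) (maximize : Bool) (r : Int) :
    runningBestLoopA scores maximize (some r) =
      running_best_alt.weave scores
        (accStep (if maximize then max else min) r (scores.filterMap id)) := by
  induction scores generalizing r with
  | nil => rfl
  | cons h t ih =>
    cases h with
    | none => simp [runningBestLoopA, running_best_alt.weave, ih]
    | some s =>
      cases maximize <;>
        simp [runningBestLoopA, List.filterMap_cons, id, accStep,
          running_best_alt.weave, ih]

theorem loopA_none (scores : List (Option Int)) (maximize : Bool) :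
    runningBestLoopA scores maximize none = running_best_alt scores maximize := by
  induction scores with
  | nil => rfl
  | cons h t ih =>
    cases h with
    | none =>
      simp only [runningBestLoopA, ih, running_best_alt, List.filterMap_cons, id]
      cases ht : t.filterMap id <;> simp [running_best_alt.weave]
    | some s =>
      simp [running_best_alt, List.filterMap_cons, id, accGo_eq_cons_accStep,
        running_best_alt.weave, runningBestLoopA, loopA_some t maximize s]

-- ===== VERDICT (by name: the statement is the Claim_ definition above) =====
theorem running_best_spec : Claim_equal_running_best := by
  intro scores maximize _
  unfold Spec_running_best running_best
  exact loopA_none scores maximize
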